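-- pv_equiv track=rewrite | github.com/randavidmoshe/ai_crawler_server_client_aside | ai_create_all_form_pages_solution4/form_pages_crawler_server.py | _is_submission_button_keyword
-- ===== SOURCE A (Python) =====
-- def _is_submission_button_keyword(button_text: str) -> bool:
--     """Keyword-based submission button detection"""
--     text_lower = button_text.lower()
--
--     submission_keywords = [
--         'save', 'submit', 'create', 'add', 'update', 'confirm',
--         'send', 'apply', 'register', 'post', 'publish'
--     ]
--
--     for keyword in submission_keywords:
--         if keyword in text_lower:
--             return True
--
--     return False
-- ===== SOURCE B (Python) =====
-- SUBMISSION_KEYWORDS = [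
--     'save', 'submit', 'create', 'add', 'update', 'confirm',
--     'send', 'apply', 'register', 'post', 'publish'
-- ]
--
--
-- def _is_submission_button_keyword(button_text: str) -> bool:
--     """Single left-to-right scan: at each position, test whether any keyword starts there."""
--     text_lower = button_text.lower()
--     return any(
--         any(text_lower.startswith(k, i) for k in SUBMISSION_KEYWORDS)
--         for i in range(len(text_lower))
--     )
-- ===== Notes on version B (the rewrite author's own statement) =====
-- stated objective: alternative
-- what changed: Replaces A's keyword-outer loop of 11 independent substring searches by a single left-to-right scan of the text that at each position tests whether any keyword starts there (the hand-rolled form of an alternation-regex search).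
import Mathlib
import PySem

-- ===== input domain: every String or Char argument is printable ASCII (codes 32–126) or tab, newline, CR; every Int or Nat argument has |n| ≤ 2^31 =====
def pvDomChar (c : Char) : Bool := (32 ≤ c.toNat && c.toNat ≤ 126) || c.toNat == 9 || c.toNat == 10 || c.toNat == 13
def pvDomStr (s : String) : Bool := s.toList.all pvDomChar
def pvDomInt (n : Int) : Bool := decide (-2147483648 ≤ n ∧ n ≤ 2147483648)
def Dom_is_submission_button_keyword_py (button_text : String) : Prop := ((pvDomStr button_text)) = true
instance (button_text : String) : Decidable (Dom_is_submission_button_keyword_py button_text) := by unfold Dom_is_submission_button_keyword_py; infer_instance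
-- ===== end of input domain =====

-- B replaces A's per-keyword substring searches by one left-to-right positional scan of the text (alternative decomposition, same cost).


-- ===== PORT A =====
-- A: lowercase, then for each keyword test 'keyword in text_lower', returning True on the first hit.
def pySubmissionKeywords : List String :=
  ["save", "submit", "create", "add", "update", "confirm",
   "send", "apply", "register", "post", "publish"]

def is_submission_button_keyword_py (button_text : String) : Bool :=
  let text_lower := PySem.Str.lower button_text
  pySubmissionKeywords.any (fun keyword => PySem.Str.isIn keyword text_lower)

-- ===== PORT B =====
-- B: lowercase once, then one scan over the positions of the text; at each position test
-- whether any keyword starts there (text_lower.startswith(k, i)).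
def altKeywords : List (List Char) :=
  ["save".toList, "submit".toList, "create".toList, "add".toList, "update".toList,
   "confirm".toList, "send".toList, "apply".toList, "register".toList, "post".toList,
   "publish".toList]

-- the positional scan: suffix by suffix, exactly B's 'for i in range(len(t))'
def altScan : List Char → Bool
  | [] => false
  | c :: rest => altKeywords.any (fun k => k.isPrefixOf (c :: rest)) || altScan rest

def is_submission_button_keyword_py_alt (button_text : String) : Bool :=
  altScan (PySem.Chars.lower button_text.toList)

-- ===== PRECONDITION & SPEC =====
def Spec_is_submission_button_keyword_py (button_text : String) (out : Bool) : Prop := out = is_submission_button_keyword_py_alt button_text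
instance (button_text : String) (out : Bool) : Decidable (Spec_is_submission_button_keyword_py button_text out) := by unfold Spec_is_submission_button_keyword_py; infer_instance

-- ===== CLAIM (what is proved, stated in full; the proofs are below) =====
def Claim_equal_is_submission_button_keyword_py : Prop := ∀ (button_text : String), Dom_is_submission_button_keyword_py button_text → Spec_is_submission_button_keyword_py button_text (is_submission_button_keyword_py button_text)

-- ===== LEMMAS AND PROOFS =====

-- the scan finds exactly the keywords occurring as an infix of the text
theorem altScan_iff (l : List Char) :
    altScan l = true ↔ ∃ k ∈ altKeywords, k <:+: l := by
  induction l with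
  | nil =>
    simp only [altScan]
    constructor
    · intro h; exact absurd h (by simp)
    · rintro ⟨k, hk, hinf⟩
      have : k = [] := List.eq_nil_of_infix_nil hinf
      subst this
      revert hk; decide
  | cons c rest ih =>
    simp only [altScan, Bool.or_eq_true, List.any_eq_true, ih]
    constructor
    · rintro (⟨k, hk, hp⟩ | ⟨k, hk, hinf⟩)
      · exact ⟨k, hk, (List.isPrefixOf_iff_prefix.mp hp).isInfix⟩
      · exact ⟨k, hk, hinf.trans (List.infix_cons (List.infix_refl rest))⟩
    · rintro ⟨k, hk, hinf⟩
      rcases List.infix_cons_iff.mp hinf with hp | hs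
      · exact Or.inl ⟨k, hk, List.isPrefixOf_iff_prefix.mpr hp⟩
      · exact Or.inr ⟨k, hk, hs⟩

theorem altKeywords_eq : altKeywords = pySubmissionKeywords.map String.toList := by decide

theorem is_submission_button_keyword_py_spec : Claim_equal_is_submission_button_keyword_py := by
  intro button_text _
  unfold Spec_is_submission_button_keyword_py
  unfold is_submission_button_keyword_py is_submission_button_keyword_py_alt
  rcases hb : altScan (PySem.Chars.lower button_text.toList) with _ | _
  · -- scan found nothing: no keyword is an infix, so every isIn is false
    simp only [List.any_eq_true, Bool.eq_false_iff, ne_eq]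
    intro ⟨k, hk, hin⟩
    have hinf := (PySem.Str.isIn_iff_infix _ _).mp hin
    rw [PySem.Str.toList_lower] at hinf
    have : altScan (PySem.Chars.lower button_text.toList) = true :=
      (altScan_iff _).mpr ⟨k.toList, by rw [altKeywords_eq]; exact List.mem_map_of_mem hk, hinf⟩
    rw [hb] at this; exact absurd this (by simp)
  · -- scan found a keyword: exhibit it for 'any'
    rcases (altScan_iff _).mp hb with ⟨k, hk, hinf⟩
    rw [altKeywords_eq] at hk
    rcases List.mem_map.mp hk with ⟨s, hs, rfl⟩
    simp only [List.any_eq_true]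
    exact ⟨s, hs, (PySem.Str.isIn_iff_infix _ _).mpr (by rw [PySem.Str.toList_lower]; exact hinf)⟩
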